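-- pv_equiv track=rewrite | github.com/yofn/pyacm | codeforces/math数学/1000/1141A乘2或3.py | f
-- ===== SOURCE A (Python) =====
-- def f(l):
--     if l[1]%l[0]>0:
--         return -1
--     m = l[1]//l[0]
--     c = 0
--     while m%2==0:
--         m  = m//2
--         c += 1
--     while m%3==0:
--         m  = m//3
--         c += 1
--     return -1 if m>1 else c
-- ===== SOURCE B (Python) =====
-- def f(l):
--     if l[1] % l[0] > 0:
--         return -1
--     m = l[1] // l[0]
--     # Bounded exhaustive search over exponent pairs: 2**31 and 3**19 bound any
--     # quotient of 32-bit inputs, and the pair (i, j) with 2**i * 3**j == m is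
--     # unique, so the last (= only) match is the answer.
--     best = -1
--     for i in range(32):
--         for j in range(20):
--             if 2 ** i * 3 ** j == m:
--                 best = i + j
--     return best
-- ===== Notes on version B (the rewrite author's own statement) =====
-- stated objective: alternative
-- what changed: Replaces A's two factor-stripping while-loops by a bounded exhaustive search over all exponent pairs (i, j) with i < 32, j < 20, returning i + j for the unique pair with 2**i * 3**j equal to the quotient (the bounds cover every quotient of 32-bit inputs) and -1 when no pair matches.
-- intended difference: On inputs with a nonpositive remainder (second element mod first) and a negative floor-quotient m (the target is unreachable by multiplications) A returns a meaningless nonnegative count from floor-stripping the negative ratio, while B returns -1, the intended 'impossible' answer. — e.g. on f([1, -6]): A returns 2, B returns -1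
import Mathlib
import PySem

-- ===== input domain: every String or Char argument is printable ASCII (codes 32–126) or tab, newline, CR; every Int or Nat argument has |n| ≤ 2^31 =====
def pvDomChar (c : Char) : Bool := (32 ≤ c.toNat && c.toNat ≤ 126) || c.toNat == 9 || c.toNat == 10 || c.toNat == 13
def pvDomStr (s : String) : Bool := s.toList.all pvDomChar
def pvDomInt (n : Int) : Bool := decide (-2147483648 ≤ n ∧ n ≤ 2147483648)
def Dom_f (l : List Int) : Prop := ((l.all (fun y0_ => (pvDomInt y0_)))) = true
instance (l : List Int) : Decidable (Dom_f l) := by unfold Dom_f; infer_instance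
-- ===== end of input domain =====

-- B replaces A's two factor-stripping while-loops by a bounded exhaustive search over
-- all exponent pairs (i, j), i < 32, j < 20 (enough for any quotient of the 32-bit
-- inputs of Dom_f), returning i + j for the unique matching pair and -1 otherwise
-- (so, naturally, -1 instead of a meaningless count on a negative quotient — see D_f).
-- Equality of RETURN values only; neither version mutates its argument.

-- ===== PORT A =====
-- `while m%2==0: m//=2; c+=1` — the `m ≠ 0` guard only makes the recursion total where
-- the Python loop DIVERGES (m = 0, excluded by Pre_f); elsewhere it changes nothing.
def loopA2 (m c : Int) : Int × Int :=
  if h : m ≠ 0 ∧ PySem.Int.mod m 2 = 0 then loopA2 (PySem.Int.floordiv m 2) (c + 1) else (m, c)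
termination_by m.natAbs
decreasing_by
  rw [PySem.Int.floordiv_eq_ediv_of_pos (by omega)]
  rw [PySem.Int.mod_eq_emod_of_pos (by omega)] at h
  omega

-- `while m%3==0: m//=3; c+=1` (same totality guard; Python diverges only at m = 0)
def loopA3 (m c : Int) : Int × Int :=
  if h : m ≠ 0 ∧ PySem.Int.mod m 3 = 0 then loopA3 (PySem.Int.floordiv m 3) (c + 1) else (m, c)
termination_by m.natAbs
decreasing_by
  rw [PySem.Int.floordiv_eq_ediv_of_pos (by omega)]
  rw [PySem.Int.mod_eq_emod_of_pos (by omega)] at h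
  omega

def f (l : List Int) : Int :=
  match PySem.List.pyGet? l 0, PySem.List.pyGet? l 1 with
  | some a, some b =>
    match PySem.Int.mod? b a, PySem.Int.floordiv? b a with
    | some r, some m =>
      if 0 < r then -1
      else
        let p := loopA2 m 0
        let q := loopA3 p.1 p.2
        if 1 < q.1 then -1 else q.2
    | _, _ => 0  -- ZeroDivisionError (zero first element): outside Pre_f
  | _, _ => 0  -- IndexError (fewer than 2 elements): outside Pre_f

-- ===== PORT B =====
-- `for i in range(32): for j in range(20): if 2**i*3**j == m: best = i+j`
-- (`2**i` is ported as `2 ^ i.toNat`: exact, since every i produced by range(32) is ≥ 0)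
def f_alt (l : List Int) : Int :=
  match PySem.List.pyGet? l 0 with
  | none => 0  -- IndexError: outside Pre_f
  | some a =>
    match PySem.List.pyGet? l 1 with
    | none => 0  -- IndexError: outside Pre_f
    | some b =>
      match PySem.Int.mod? b a with
      | none => 0  -- ZeroDivisionError: outside Pre_f
      | some r =>
        match PySem.Int.floordiv? b a with
        | none => 0  -- ZeroDivisionError: outside Pre_f
        | some m =>
          if 0 < r then -1
          else
            (PySem.List.pyRange 0 32 1).foldl (fun best i =>
              (PySem.List.pyRange 0 20 1).foldl (fun best j =>
                if 2 ^ i.toNat * 3 ^ j.toNat = m then i + j else best) best) (-1)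

-- ===== PRECONDITION & SPEC =====
-- Pre_f excludes only inputs on which A never returns: lists shorter than 2 (IndexError),
-- a zero first element (ZeroDivisionError), and a zero floor-quotient with nonpositive
-- remainder (A's first while-loop runs forever on m = 0).
def Pre_f (l : List Int) : Prop :=
  2 ≤ l.length ∧ l.getD 0 0 ≠ 0 ∧
    (0 < PySem.Int.mod (l.getD 1 0) (l.getD 0 0) ∨
      PySem.Int.floordiv (l.getD 1 0) (l.getD 0 0) ≠ 0)
instance (l : List Int) : Decidable (Pre_f l) := by unfold Pre_f; infer_instance
def pvWitness_f : List Int := [1, 6]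

-- On inputs whose remainder (second element mod first) is nonpositive and whose floor-quotient
-- m is negative (so the target is unreachable by multiplications), A returns a nonnegative
-- count produced by floor-stripping the negative m, while B returns -1, the intended
-- "impossible" answer.
def D_f (l : List Int) : Prop :=
  2 ≤ l.length ∧ PySem.Int.mod (l.getD 1 0) (l.getD 0 0) ≤ 0 ∧
    PySem.Int.floordiv (l.getD 1 0) (l.getD 0 0) ≤ -1
instance (l : List Int) : Decidable (D_f l) := by unfold D_f; infer_instance

def Spec_f (l : List Int) (out : Int) : Prop := ¬ D_f l → out = f_alt l
instance (l : List Int) (out : Int) : Decidable (Spec_f l out) := by unfold Spec_f; infer_instance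

def pvDiffWitness_f : List Int := [1, -6]
def pvDiffWitnessOut_f : Int × Int := (2, -1)

-- ===== CLAIM (what is proved, stated in full; the proofs are below) =====
def Claim_unchanged_f : Prop := ∀ (l : List Int), Dom_f l → Pre_f l → Spec_f l (f l)
def Claim_changed_f : Prop := Dom_f (pvDiffWitness_f) ∧ Pre_f (pvDiffWitness_f) ∧ D_f (pvDiffWitness_f) ∧ f (pvDiffWitness_f) = pvDiffWitnessOut_f.1 ∧ f_alt (pvDiffWitness_f) = pvDiffWitnessOut_f.2 ∧ pvDiffWitnessOut_f.1 ≠ pvDiffWitnessOut_f.2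
def Claim_exact_f : Prop := ∀ (l : List Int), Dom_f l → Pre_f l → D_f l → f l ≠ f_alt l

-- ===== LEMMAS AND PROOFS =====

lemma pymod2 (a : Int) : PySem.Int.mod a 2 = a % 2 := PySem.Int.mod_eq_emod_of_pos (by omega)
lemma pymod3 (a : Int) : PySem.Int.mod a 3 = a % 3 := PySem.Int.mod_eq_emod_of_pos (by omega)
lemma pydiv2 (a : Int) : PySem.Int.floordiv a 2 = a / 2 := PySem.Int.floordiv_eq_ediv_of_pos (by omega)
lemma pydiv3 (a : Int) : PySem.Int.floordiv a 3 = a / 3 := PySem.Int.floordiv_eq_ediv_of_pos (by omega)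

-- characterisation of A's 2-stripping loop on a positive m
lemma loopA2_char (m c : Int) (h : 1 ≤ m) :
    ∃ k : Nat, m = 2 ^ k * (loopA2 m c).1 ∧ (loopA2 m c).2 = c + k ∧
      (loopA2 m c).1 % 2 ≠ 0 ∧ 1 ≤ (loopA2 m c).1 := by
  induction m, c using loopA2.induct with
  | case1 m c hg ih =>
    rw [pymod2] at hg
    have h2 : 1 ≤ PySem.Int.floordiv m 2 := by rw [pydiv2]; omega
    rw [loopA2, dif_pos (by rw [pymod2]; exact hg)]
    obtain ⟨k, e1, e2, e3, e4⟩ := ih h2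
    rw [pydiv2] at e1 e2 e3 e4 ⊢
    refine ⟨k + 1, ?_, by rw [e2]; push_cast; ring, e3, e4⟩
    calc m = 2 * (m / 2) := by omega
      _ = 2 ^ (k + 1) * (loopA2 (m / 2) (c + 1)).1 := by rw [pow_succ]; linear_combination 2 * e1
  | case2 m c hg =>
    rw [loopA2, dif_neg hg]
    rw [pymod2] at hg
    exact ⟨0, by ring, by push_cast; ring, by omega, h⟩

-- characterisation of A's 3-stripping loop on a positive odd m
lemma loopA3_char (m c : Int) (h : 1 ≤ m) (hodd : m % 2 ≠ 0) :
    ∃ k : Nat, m = 3 ^ k * (loopA3 m c).1 ∧ (loopA3 m c).2 = c + k ∧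
      (loopA3 m c).1 % 2 ≠ 0 ∧ (loopA3 m c).1 % 3 ≠ 0 ∧ 1 ≤ (loopA3 m c).1 := by
  induction m, c using loopA3.induct with
  | case1 m c hg ih =>
    rw [pymod3] at hg
    have h3 : 1 ≤ PySem.Int.floordiv m 3 := by rw [pydiv3]; omega
    have hodd3 : PySem.Int.floordiv m 3 % 2 ≠ 0 := by rw [pydiv3]; omega
    rw [loopA3, dif_pos (by rw [pymod3]; exact hg)]
    obtain ⟨k, e1, e2, e3, e4, e5⟩ := ih h3 hodd3
    rw [pydiv3] at e1 e2 e3 e4 e5 ⊢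
    refine ⟨k + 1, ?_, by rw [e2]; push_cast; ring, e3, e4, e5⟩
    calc m = 3 * (m / 3) := by omega
      _ = 3 ^ (k + 1) * (loopA3 (m / 3) (c + 1)).1 := by rw [pow_succ]; linear_combination 3 * e1
  | case2 m c hg =>
    rw [loopA3, dif_neg hg]
    rw [pymod3] at hg
    exact ⟨0, by ring, by push_cast; ring, hodd, by omega, h⟩

-- On a negative m A's loops keep m negative and only grow the count
lemma loopA2_neg (m c : Int) (h : m ≤ -1) :
    (loopA2 m c).1 ≤ -1 ∧ c ≤ (loopA2 m c).2 := by
  induction m, c using loopA2.induct with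
  | case1 m c hg ih =>
    rw [pymod2] at hg
    have h2 : PySem.Int.floordiv m 2 ≤ -1 := by rw [pydiv2]; omega
    rw [loopA2, dif_pos (by rw [pymod2]; exact hg)]
    have := ih h2
    exact ⟨this.1, by omega⟩
  | case2 m c hg =>
    rw [loopA2, dif_neg hg]
    exact ⟨h, le_refl c⟩

lemma loopA3_neg (m c : Int) (h : m ≤ -1) :
    (loopA3 m c).1 ≤ -1 ∧ c ≤ (loopA3 m c).2 := by
  induction m, c using loopA3.induct with
  | case1 m c hg ih =>
    rw [pymod3] at hg
    have h3 : PySem.Int.floordiv m 3 ≤ -1 := by rw [pydiv3]; omega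
    rw [loopA3, dif_pos (by rw [pymod3]; exact hg)]
    have := ih h3
    exact ⟨this.1, by omega⟩
  | case2 m c hg =>
    rw [loopA3, dif_neg hg]
    exact ⟨h, le_refl c⟩

-- the step functions of B's two folds (proof-side names for the lambdas in f_alt)
def stepInner (m i : Int) : Int → Int → Int :=
  fun best j => if 2 ^ i.toNat * 3 ^ j.toNat = m then i + j else best
def stepOuter (m : Int) : Int → Int → Int :=
  fun best i => (PySem.List.pyRange 0 20 1).foldl (stepInner m i) best

lemma inner_keep (m i v : Int) (xs : List Int)
    (h : ∀ j ∈ xs, 2 ^ i.toNat * 3 ^ j.toNat = m → i + j = v) :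
    xs.foldl (stepInner m i) v = v := by
  induction xs with
  | nil => rfl
  | cons j t ih =>
    simp only [List.foldl_cons, stepInner]
    split_ifs with hp
    · rw [h j List.mem_cons_self hp]; exact ih fun x hx => h x (List.mem_cons_of_mem _ hx)
    · exact ih fun x hx => h x (List.mem_cons_of_mem _ hx)

lemma inner_none (m i b : Int) (xs : List Int)
    (h : ∀ j ∈ xs, ¬ (2 ^ i.toNat * 3 ^ j.toNat = m)) :
    xs.foldl (stepInner m i) b = b := by
  induction xs with
  | nil => rfl
  | cons j t ih =>
    simp only [List.foldl_cons, stepInner, if_neg (h j List.mem_cons_self)]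
    exact ih fun x hx => h x (List.mem_cons_of_mem _ hx)

lemma inner_found (m i v b : Int) (xs : List Int)
    (hex : ∃ j0 ∈ xs, 2 ^ i.toNat * 3 ^ j0.toNat = m)
    (huniq : ∀ j ∈ xs, 2 ^ i.toNat * 3 ^ j.toNat = m → i + j = v) :
    xs.foldl (stepInner m i) b = v := by
  induction xs generalizing b with
  | nil => obtain ⟨j0, hj0, _⟩ := hex; cases hj0
  | cons j t ih =>
    simp only [List.foldl_cons, stepInner]
    split_ifs with hp
    · rw [huniq j List.mem_cons_self hp]
      exact inner_keep m i v t fun x hx => huniq x (List.mem_cons_of_mem _ hx)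
    · obtain ⟨j0, hj0, hpj0⟩ := hex
      have hj0t : j0 ∈ t := by
        rcases List.mem_cons.mp hj0 with rfl | h'
        · exact absurd hpj0 hp
        · exact h'
      exact ih b ⟨j0, hj0t, hpj0⟩ (fun x hx => huniq x (List.mem_cons_of_mem _ hx))

lemma outer_none (m b : Int) (ys : List Int)
    (h : ∀ i ∈ ys, ∀ j ∈ PySem.List.pyRange 0 20 1, ¬ (2 ^ i.toNat * 3 ^ j.toNat = m)) :
    ys.foldl (stepOuter m) b = b := by
  induction ys with
  | nil => rfl
  | cons i t ih =>
    simp only [List.foldl_cons, stepOuter]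
    rw [inner_none m i b _ (h i List.mem_cons_self)]
    exact ih fun x hx => h x (List.mem_cons_of_mem _ hx)

lemma outer_keep (m v : Int) (ys : List Int)
    (h : ∀ i ∈ ys, ∀ j ∈ PySem.List.pyRange 0 20 1,
      2 ^ i.toNat * 3 ^ j.toNat = m → i + j = v) :
    ys.foldl (stepOuter m) v = v := by
  induction ys with
  | nil => rfl
  | cons i t ih =>
    simp only [List.foldl_cons, stepOuter]
    rw [inner_keep m i v _ (h i List.mem_cons_self)]
    exact ih fun x hx => h x (List.mem_cons_of_mem _ hx)

lemma outer_found (m v b : Int) (ys : List Int)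
    (hex : ∃ i0 ∈ ys, ∃ j0 ∈ PySem.List.pyRange 0 20 1, 2 ^ i0.toNat * 3 ^ j0.toNat = m)
    (huniq : ∀ i ∈ ys, ∀ j ∈ PySem.List.pyRange 0 20 1,
      2 ^ i.toNat * 3 ^ j.toNat = m → i + j = v) :
    ys.foldl (stepOuter m) b = v := by
  induction ys generalizing b with
  | nil => obtain ⟨i0, hi0, _⟩ := hex; cases hi0
  | cons i t ih =>
    simp only [List.foldl_cons, stepOuter]
    by_cases hm : ∃ j ∈ PySem.List.pyRange 0 20 1, 2 ^ i.toNat * 3 ^ j.toNat = m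
    · rw [inner_found m i v b _ hm (huniq i List.mem_cons_self)]
      exact outer_keep m v t fun x hx => huniq x (List.mem_cons_of_mem _ hx)
    · rw [inner_none m i b _ (fun j hj hp => hm ⟨j, hj, hp⟩)]
      obtain ⟨i0, hi0, hrest⟩ := hex
      have hi0t : i0 ∈ t := by
        rcases List.mem_cons.mp hi0 with rfl | h'
        · exact absurd hrest hm
        · exact h'
      exact ih b ⟨i0, hi0t, hrest⟩ (fun x hx => huniq x (List.mem_cons_of_mem _ hx))

-- stripping a prime-like factor p: if p^i * u = p^a * v with p ∤ u, p ∤ v then i = a and u = v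
lemma strip (p : Nat) (hp : 2 ≤ p) :
    ∀ i a u v : Nat, ¬ p ∣ u → ¬ p ∣ v → p ^ i * u = p ^ a * v → i = a ∧ u = v := by
  intro i
  induction i with
  | zero =>
    intro a u v hu hv h
    cases a with
    | zero => simpa using h
    | succ k =>
      have hu' : u = p ^ (k + 1) * v := by simpa using h
      exact absurd ⟨p ^ k * v, by rw [hu', pow_succ]; ring⟩ hu
  | succ n ih =>
    intro a u v hu hv h
    cases a with
    | zero =>
      have hv' : v = p ^ (n + 1) * u := by
        have := h.symm
        simpa using this
      exact absurd ⟨p ^ n * u, by rw [hv', pow_succ]; ring⟩ hv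
    | succ k =>
      have h2 : p * (p ^ n * u) = p * (p ^ k * v) := by
        calc p * (p ^ n * u) = p ^ (n + 1) * u := by ring
          _ = p ^ (k + 1) * v := h
          _ = p * (p ^ k * v) := by ring
      obtain ⟨e1, e2⟩ := ih k u v hu hv (Nat.eq_of_mul_eq_mul_left (by omega) h2)
      exact ⟨by omega, e2⟩

-- unique factorisation over {2, 3}: 2^i * 3^j = 2^a * 3^b * S forces i = a, j = b, S = 1
lemma pow23_unique (i j a b S : Nat) (hS2 : ¬ 2 ∣ S) (hS3 : ¬ 3 ∣ S)
    (h : 2 ^ i * 3 ^ j = 2 ^ a * (3 ^ b * S)) : i = a ∧ j = b ∧ S = 1 := by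
  have h2u : ¬ 2 ∣ 3 ^ j := fun hd => by
    have := Nat.Prime.dvd_of_dvd_pow Nat.prime_two hd; omega
  have h2v : ¬ 2 ∣ 3 ^ b * S := by
    intro hd
    rcases (Nat.Prime.dvd_mul Nat.prime_two).mp hd with hd | hd
    · exact absurd (Nat.Prime.dvd_of_dvd_pow Nat.prime_two hd) (by omega)
    · exact hS2 hd
  obtain ⟨e1, e2⟩ := strip 2 (by omega) i a (3 ^ j) (3 ^ b * S) h2u h2v h
  have h3u : ¬ 3 ∣ (1 : Nat) := by omega
  obtain ⟨e3, e4⟩ := strip 3 (by omega) j b 1 S h3u hS3 (by rw [mul_one]; exact e2)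
  exact ⟨e1, e3, e4.symm⟩

-- cast of the factorisation into ℕ and back: a match (i, j) in B's search forces
-- s = 1 and (i, j) = (A, B)
lemma match_unique (m s : Int) (A B : Nat) (hm : m = 2 ^ A * (3 ^ B * s))
    (hs1 : 1 ≤ s) (hs2 : s % 2 ≠ 0) (hs3 : s % 3 ≠ 0)
    (i j : Int) (hi : 0 ≤ i) (hj : 0 ≤ j)
    (h : 2 ^ i.toNat * 3 ^ j.toNat = m) : s = 1 ∧ i = (A : Int) ∧ j = (B : Int) := by
  have hsN : ((s.toNat : Int)) = s := Int.toNat_of_nonneg (by omega)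
  have hnat : 2 ^ i.toNat * 3 ^ j.toNat = 2 ^ A * (3 ^ B * s.toNat) := by
    have : ((2 ^ i.toNat * 3 ^ j.toNat : Nat) : Int) = ((2 ^ A * (3 ^ B * s.toNat) : Nat) : Int) := by
      push_cast
      rw [hsN, h, hm]
    exact_mod_cast this
  have hS2 : ¬ 2 ∣ s.toNat := by
    intro ⟨t, ht⟩
    apply hs2
    have : s = 2 * (t : Int) := by rw [← hsN, ht]; push_cast; ring
    omega
  have hS3 : ¬ 3 ∣ s.toNat := by
    intro ⟨t, ht⟩
    apply hs3
    have : s = 3 * (t : Int) := by rw [← hsN, ht]; push_cast; ring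
    omega
  obtain ⟨e1, e2, e3⟩ := pow23_unique i.toNat j.toNat A B s.toNat hS2 hS3 hnat
  refine ⟨by omega, ?_, ?_⟩
  · rw [← e1]; omega
  · rw [← e2]; omega

-- the quotient of 32-bit inputs is at most 2^31
lemma quot_bound (a b : Int) (ha : a ≠ 0) (hb : b ≤ 2147483648) (hb' : -2147483648 ≤ b)
    (hm : 1 ≤ PySem.Int.floordiv b a) : PySem.Int.floordiv b a ≤ 2147483648 := by
  rcases lt_or_gt_of_ne ha with hneg | hpos
  · rw [← PySem.Int.floordiv_neg_neg] at hm ⊢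
    rw [PySem.Int.floordiv_eq_ediv_of_pos (by omega)] at hm ⊢
    by_cases hb0 : 0 ≤ -b
    · calc -b / -a ≤ -b := Int.ediv_le_self _ hb0
        _ ≤ 2147483648 := by omega
    · exfalso
      have : -b / -a ≤ 0 := Int.ediv_nonpos_of_nonpos_of_neg (by omega) (by omega)
      omega
  · rw [PySem.Int.floordiv_eq_ediv_of_pos hpos] at hm ⊢
    by_cases hb0 : 0 ≤ b
    · calc b / a ≤ b := Int.ediv_le_self _ hb0
        _ ≤ 2147483648 := hb
    · exfalso
      have : b / a ≤ 0 := Int.ediv_nonpos_of_nonpos_of_neg (by omega) (by omega)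
      omega

-- common head computation of both ports on a two-element-or-longer list
lemma f_unfold (a b : Int) (t : List Int) (ha : a ≠ 0) :
    f (a :: b :: t) =
      (if 0 < PySem.Int.mod b a then -1
       else
        let p := loopA2 (PySem.Int.floordiv b a) 0
        let q := loopA3 p.1 p.2
        if 1 < q.1 then -1 else q.2) ∧
    f_alt (a :: b :: t) =
      (if 0 < PySem.Int.mod b a then -1
       else (PySem.List.pyRange 0 32 1).foldl (stepOuter (PySem.Int.floordiv b a)) (-1)) := by
  unfold f f_alt
  rw [PySem.List.pyGet?_zero_cons]
  rw [show PySem.List.pyGet? (a :: b :: t) 1 = some b from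
    PySem.List.pyGet?_ofNat (n := 1) (xs := a :: b :: t) (by simp)]
  dsimp only
  rw [show PySem.Int.mod? b a = some (PySem.Int.mod b a) from by
      simp [PySem.Int.mod?, PySem.Int.mod, ha],
    show PySem.Int.floordiv? b a = some (PySem.Int.floordiv b a) from by
      simp [PySem.Int.floordiv?, PySem.Int.floordiv, ha]]
  exact ⟨rfl, rfl⟩

-- ===== VERDICT (by name: the statement is the Claim_ definition above) =====
theorem f_spec : Claim_unchanged_f := by
  intro l hdom hpre hnd
  match l with
  | a :: b :: t =>
    obtain ⟨_, ha, hpre3⟩ := hpre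
    simp only [List.getD_cons_zero, List.getD_cons_succ] at ha hpre3
    have hnd' : ¬ (PySem.Int.mod b a ≤ 0 ∧ PySem.Int.floordiv b a ≤ -1) := by
      intro hc
      refine hnd ⟨by simp, ?_, ?_⟩ <;>
        simp only [List.getD_cons_zero, List.getD_cons_succ] <;> [exact hc.1; exact hc.2]
    show f (a :: b :: t) = f_alt (a :: b :: t)
    obtain ⟨hfa, hfb⟩ := f_unfold a b t ha
    rw [hfa, hfb]
    by_cases hr : 0 < PySem.Int.mod b a
    · rw [if_pos hr, if_pos hr]
    · rw [if_neg hr, if_neg hr]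
      set m := PySem.Int.floordiv b a with hmdef
      have hm1 : 1 ≤ m := by
        rcases hpre3 with h | h
        · exact absurd h hr
        · omega
      -- domain bound on b, hence on m
      have hbd : b ≤ 2147483648 ∧ -2147483648 ≤ b := by
        have hb := List.all_eq_true.mp hdom b (by simp)
        simp [pvDomInt] at hb
        exact ⟨hb.2, hb.1⟩
      have hmB : m ≤ 2147483648 := quot_bound a b ha hbd.1 hbd.2 hm1
      -- A-side characterisation
      obtain ⟨A, e1, e2, e3, e4⟩ := loopA2_char m 0 hm1
      obtain ⟨B, g1, g2, g3, g4, g5⟩ := loopA3_char _ _ e4 e3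
      set p := loopA2 m 0
      set q := loopA3 p.1 p.2
      set s := q.1 with hsdef
      have hms : m = 2 ^ A * (3 ^ B * s) := by rw [e1, g1]
      have hcount : q.2 = (A : Int) + (B : Int) := by rw [g2, e2]; ring
      by_cases hs : 1 < s
      · -- unreachable: no exponent pair matches, B's search returns -1
        rw [if_pos hs]
        rw [outer_none _ _ _ ?_]
        intro i hi j hj hp
        have hi' := (PySem.List.mem_pyRange_one.mp hi).1
        have hj' := (PySem.List.mem_pyRange_one.mp hj).1
        obtain ⟨hs1, _, _⟩ := match_unique m s A B hms (by omega) g3 g4 i j hi' hj' hp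
        omega
      · -- s = 1: the unique pair (A, B) is found and equals A's count
        have hs1 : s = 1 := by omega
        rw [if_neg hs]
        rw [outer_found m q.2 (-1) _ ?_ ?_]
        · -- existence of the matching pair, with the range bounds from m ≤ 2^31
          have hA31 : A ≤ 31 := by
            by_contra hA
            have : (2 : Int) ^ 32 ≤ 2 ^ A := by
              apply pow_le_pow_right₀ (by omega) (by omega)
            have h1 : (2 : Int) ^ A ≤ m := by
              rw [hms, hs1]
              have : (1 : Int) ≤ 3 ^ B := one_le_pow₀ (by omega)
              nlinarith [pow_pos (show (0:Int) < 2 by omega) A]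
            norm_num at this h1
            omega
          have hB19 : B ≤ 19 := by
            by_contra hB
            have : (3 : Int) ^ 20 ≤ 3 ^ B := by
              apply pow_le_pow_right₀ (by omega) (by omega)
            have h1 : (3 : Int) ^ B ≤ m := by
              rw [hms, hs1]
              have : (1 : Int) ≤ 2 ^ A := one_le_pow₀ (by omega)
              nlinarith [pow_pos (show (0:Int) < 3 by omega) B]
            norm_num at this h1
            omega
          refine ⟨(A : Int), PySem.List.mem_pyRange_one.mpr ⟨by omega, by exact_mod_cast by omega⟩,
            (B : Int), PySem.List.mem_pyRange_one.mpr ⟨by omega, by exact_mod_cast by omega⟩, ?_⟩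
          rw [Int.toNat_natCast, Int.toNat_natCast, hms, hs1]
          ring
        · intro i hi j hj hp
          have hi' := (PySem.List.mem_pyRange_one.mp hi).1
          have hj' := (PySem.List.mem_pyRange_one.mp hj).1
          obtain ⟨_, hiA, hjB⟩ := match_unique m s A B hms (by omega) g3 g4 i j hi' hj' hp
          rw [hiA, hjB, hcount]
  | [] => exact absurd hpre.1 (by simp)
  | [_] => exact absurd hpre.1 (by simp)

theorem f_changed : Claim_changed_f := by
  unfold Claim_changed_f
  refine ⟨by decide, by decide, by decide, ?_, ?_, by decide⟩
  · show f [1, -6] = 2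
    obtain ⟨hfa, _⟩ := f_unfold 1 (-6) [] (by omega)
    rw [hfa]
    norm_num [show PySem.Int.mod (-6) 1 = 0 from by decide,
      show PySem.Int.floordiv (-6) 1 = -6 from by decide]
    rw [loopA2, loopA2, loopA2, loopA3, loopA3, loopA3]
    norm_num [pymod2, pymod3, pydiv2, pydiv3]
  · show f_alt [1, -6] = -1
    obtain ⟨_, hfb⟩ := f_unfold 1 (-6) [] (by omega)
    rw [hfb]
    rw [if_neg (by decide), outer_none _ _ _ ?_]
    intro i hi j hj hp
    have hpos : (0 : Int) < 2 ^ i.toNat * 3 ^ j.toNat := by positivity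
    rw [show PySem.Int.floordiv (-6) 1 = -6 from by decide] at hp
    omega

theorem f_tight : Claim_exact_f := by
  intro l _ hpre hd
  match l with
  | a :: b :: t =>
    obtain ⟨_, ha, _⟩ := hpre
    obtain ⟨_, hd2, hd3⟩ := hd
    simp only [List.getD_cons_zero, List.getD_cons_succ] at ha hd2 hd3
    show f (a :: b :: t) ≠ f_alt (a :: b :: t)
    obtain ⟨hfa, hfb⟩ := f_unfold a b t ha
    rw [hfa, hfb]
    obtain ⟨h1, h2⟩ := loopA2_neg (PySem.Int.floordiv b a) 0 hd3
    obtain ⟨h3, h4⟩ := loopA3_neg (loopA2 (PySem.Int.floordiv b a) 0).1 (loopA2 (PySem.Int.floordiv b a) 0).2 h1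
    rw [if_neg (show ¬0 < PySem.Int.mod b a by omega),
      if_neg (show ¬0 < PySem.Int.mod b a by omega),
      if_neg (show ¬1 < (loopA3 (loopA2 (PySem.Int.floordiv b a) 0).1
        (loopA2 (PySem.Int.floordiv b a) 0).2).1 by omega),
      outer_none _ _ _ ?_]
    · omega
    · intro i hi j hj hp
      have hpos : (0 : Int) < 2 ^ i.toNat * 3 ^ j.toNat := by positivity
      omega
  | [] => exact absurd hpre.1 (by simp)
  | [_] => exact absurd hpre.1 (by simp)
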